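-- pv_equiv track=rewrite | github.com/Andrew-McCormack/DT228-Computer-Science-Year-4-Files | Advanced Security/Lab 2/VigenereCipher.py | findSameSizeSubStrings
-- ===== SOURCE A (Python) =====
-- def findSameSizeSubStrings(message, n):
--     m = list(message)
--     word = ''
--     potentialSubStringMatches = []
--
--     for c in message:
--         if (c.isalpha()):
--             word = word + c
--         else:
--             if len(word) == n:
--                 potentialSubStringMatches.append(word)
--                 word = ''
--             else:
--                 word = ''
--
--     return potentialSubStringMatches
-- ===== SOURCE B (Python) =====
-- def findSameSizeSubStrings(message, n):
--     # Mark every non-alphabetic character with a sentinel and split on it: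
--     # the pieces are exactly the runs delimited by non-alphabetic characters.
--     marked = ''.join(c if c.isalpha() else '\n' for c in message)
--     segments = marked.split('\n')
--     # Only runs terminated by a non-alphabetic character are collected
--     # (the last piece is the unterminated trailing run).
--     return [w for w in segments[:-1] if len(w) == n]
-- ===== Notes on version B (the rewrite author's own statement) =====
-- stated objective: alternative
-- what changed: Replaces A's character-by-character accumulator loop (grow `word`, flush on each non-alpha char) by a split decomposition: map every non-alphabetic character to a sentinel, split on the sentinel, and keep the delimited segments of length n.
import Mathlib
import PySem

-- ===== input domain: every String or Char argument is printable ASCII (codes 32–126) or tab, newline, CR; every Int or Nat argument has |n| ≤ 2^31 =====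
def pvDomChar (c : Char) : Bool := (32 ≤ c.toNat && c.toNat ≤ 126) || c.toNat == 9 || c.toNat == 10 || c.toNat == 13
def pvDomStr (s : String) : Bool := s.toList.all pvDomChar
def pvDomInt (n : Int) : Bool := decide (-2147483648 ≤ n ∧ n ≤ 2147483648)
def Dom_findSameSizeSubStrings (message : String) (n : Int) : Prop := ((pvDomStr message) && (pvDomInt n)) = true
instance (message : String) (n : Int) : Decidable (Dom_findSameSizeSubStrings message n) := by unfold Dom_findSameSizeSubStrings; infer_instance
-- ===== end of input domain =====

-- B replaces A's character-by-character accumulator loop by a split decomposition: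
-- mark non-alphabetic characters with a sentinel, split on it, keep the delimited
-- runs of length n (alternative decomposition, same cost).

-- ===== PORT A =====
-- A's loop: accumulate the current alphabetic run in `word`; on a non-alphabetic
-- character flush it into the accumulator iff its length is n.  (A's `m = list(message)`
-- is dead code and is not ported.)
def findSameSizeSubStringsLoopA (n : Int) : List Char → List Char → List String → List String
  | [], _, acc => acc
  | c :: cs, word, acc =>
    if PySem.Chars.isalpha c then
      findSameSizeSubStringsLoopA n cs (word ++ [c]) acc
    else if (word.length : Int) = n then
      findSameSizeSubStringsLoopA n cs [] (acc ++ [String.ofList word])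
    else
      findSameSizeSubStringsLoopA n cs [] acc

def findSameSizeSubStrings (message : String) (n : Int) : List String :=
  findSameSizeSubStringsLoopA n message.toList [] []

-- ===== PORT B =====
-- the marking: `c if c.isalpha() else '\n'`
def pvMark (c : Char) : Char := if PySem.Chars.isalpha c then c else '\n'

-- Source B: marked = ''.join(c if c.isalpha() else '\n' for c in message);
-- segments = marked.split('\n'); return [w for w in segments[:-1] if len(w) == n]
def findSameSizeSubStrings_alt (message : String) (n : Int) : List String :=
  let marked := message.toList.map pvMark
  let segments := List.splitOn '\n' marked
  (segments.dropLast.filter (fun w => (w.length : Int) = n)).map String.ofList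

-- ===== PRECONDITION & SPEC =====
def Spec_findSameSizeSubStrings (message : String) (n : Int) (out : List String) : Prop := out = findSameSizeSubStrings_alt message n
instance (message : String) (n : Int) (out : List String) : Decidable (Spec_findSameSizeSubStrings message n out) := by unfold Spec_findSameSizeSubStrings; infer_instance

-- ===== CLAIM (what is proved, stated in full; the proofs are below) =====
def Claim_equal_findSameSizeSubStrings : Prop := ∀ (message : String) (n : Int), Dom_findSameSizeSubStrings message n → Spec_findSameSizeSubStrings message n (findSameSizeSubStrings message n)

-- ===== LEMMAS AND PROOFS =====

-- an alphabetic character is never the sentinel '\n'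
theorem pv_isalpha_ne_newline (c : Char) (h : PySem.Chars.isalpha c = true) : (c == '\n') = false := by
  simp only [beq_eq_false_iff_ne, ne_eq]
  intro hc
  subst hc
  exact absurd h (by decide)

-- prepending the empty pending run changes nothing
theorem pv_modifyHead_nil_append (l : List (List Char)) :
    l.modifyHead (fun x => ([] : List Char) ++ x) = l := by
  cases l <;> simp

-- loop invariant: A's loop equals B's split pipeline with the pending run
-- prepended to the first segment
theorem pv_loop_eq (n : Int) (cs : List Char) : ∀ (word : List Char) (acc : List String),
    findSameSizeSubStringsLoopA n cs word acc =
      acc ++ ((((List.splitOn '\n' (cs.map pvMark)).modifyHead (fun x => word ++ x)).dropLast.filter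
        (fun w => (w.length : Int) = n)).map String.ofList) := by
  induction cs with
  | nil =>
    intro word acc
    simp [findSameSizeSubStringsLoopA, List.splitOn_nil]
  | cons c cs ih =>
    intro word acc
    by_cases hc : PySem.Chars.isalpha c = true
    · have hne := pv_isalpha_ne_newline c hc
      have hm : pvMark c = c := by simp [pvMark, hc]
      have key : List.splitOn '\n' ((c :: cs).map pvMark)
          = List.modifyHead (List.cons c) (List.splitOn '\n' (cs.map pvMark)) := by
        simp [List.splitOn, List.splitOnP_cons, hm, hne]
      simp only [findSameSizeSubStringsLoopA, hc, if_true]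
      rw [ih (word ++ [c]) acc, key, List.modifyHead_modifyHead]
      have hfun : ((fun x => word ++ x) ∘ List.cons c) = fun x => (word ++ [c]) ++ x := by
        funext x; simp
      rw [hfun]
    · have hm : pvMark c = '\n' := by simp [pvMark, hc]
      have hsp : List.splitOn '\n' ((c :: cs).map pvMark)
          = [] :: List.splitOn '\n' (cs.map pvMark) := by
        simp [List.splitOn, List.splitOnP_cons, hm]
      have hnn : List.splitOn '\n' (cs.map pvMark) ≠ [] := List.splitOnP_ne_nil _ _
      rw [hsp]
      simp only [List.modifyHead, List.append_nil, List.dropLast_cons_of_ne_nil hnn,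
        List.filter_cons]
      by_cases hw : (word.length : Int) = n
      · simp only [findSameSizeSubStringsLoopA, hc, hw, if_true]
        rw [ih [] (acc ++ [String.ofList word]), pv_modifyHead_nil_append]
        simp
      · simp only [findSameSizeSubStringsLoopA, hc, hw]
        rw [ih [] acc, pv_modifyHead_nil_append]
        simp

-- ===== VERDICT (by name: the statement is the Claim_ definition above) =====
theorem findSameSizeSubStrings_spec : Claim_equal_findSameSizeSubStrings := by
  intro message n _
  unfold Spec_findSameSizeSubStrings findSameSizeSubStrings findSameSizeSubStrings_alt
  rw [pv_loop_eq, pv_modifyHead_nil_append]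
  simp
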